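-- pv_equiv track=rewrite | github.com/pypi-data/pypi-mirror-403 | packages/gutenfetchen/gutenfetchen-1.2.0-py3-none-any.whl/gutenfetchen/cleaner.py | _strip_produced_by
-- ===== SOURCE A (Python) =====
-- _BOILERPLATE_PREFIXES = (
--     "produced by",
--     "e-text prepared by",
-- )
--
-- def _strip_produced_by(lines: list[str]) -> list[str]:
--     """Remove boilerplate credit blocks from the first 100 lines.
--
--     Finds a line starting with a known prefix (case-insensitive),
--     deletes it and every following line until hitting a blank line.
--     The blank line is kept.
--     """
--     limit = min(100, len(lines))
--     for i in range(limit):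
--         lower = lines[i].lower()
--         if any(lower.startswith(p) for p in _BOILERPLATE_PREFIXES):
--             end = i + 1
--             while end < len(lines) and lines[end].strip():
--                 end += 1
--             return lines[:i] + lines[end:]
--     return lines
-- ===== SOURCE B (Python) =====
-- _BOILERPLATE_PREFIXES = (
--     "produced by",
--     "e-text prepared by",
-- )
--
-- def _strip_produced_by(lines: list[str]) -> list[str]:
--     """Single pass with a three-state flag: 0 searching, 1 skipping block, 2 done."""
--     out = []
--     state = 0
--     for i, line in enumerate(lines):
--         if state == 0 and i < 100 and line.lower().startswith(_BOILERPLATE_PREFIXES):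
--             state = 1
--         elif state == 1:
--             if not line.strip():
--                 out.append(line)
--                 state = 2
--         else:
--             out.append(line)
--     return out
-- ===== Notes on version B (the rewrite author's own statement) =====
-- stated objective: alternative
-- what changed: Replaced A's find-the-index-then-splice-slices loop (index search + inner while scan + lines[:i]+lines[end:]) by a single enumerate pass that builds the output list under a three-state flag (searching / skipping block / done).
import Mathlib
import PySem

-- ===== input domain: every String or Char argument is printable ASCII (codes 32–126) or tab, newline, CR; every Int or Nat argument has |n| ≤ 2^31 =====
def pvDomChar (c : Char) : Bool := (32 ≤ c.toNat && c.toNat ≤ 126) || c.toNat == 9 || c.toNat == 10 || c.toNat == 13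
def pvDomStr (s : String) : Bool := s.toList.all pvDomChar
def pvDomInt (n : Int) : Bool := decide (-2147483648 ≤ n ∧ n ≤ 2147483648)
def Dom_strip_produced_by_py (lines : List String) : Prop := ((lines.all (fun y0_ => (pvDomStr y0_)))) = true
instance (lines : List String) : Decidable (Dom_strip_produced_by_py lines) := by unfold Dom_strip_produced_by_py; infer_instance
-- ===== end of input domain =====

-- B is an alternative single-pass decomposition (build the output under a three-state flag)
-- instead of A's index search + inner blank scan + slice splice; return values proved equal.

-- ===== PORT A =====
-- any(lower.startswith(p) for p in _BOILERPLATE_PREFIXES)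
def pvHit (line : String) : Bool :=
  ["produced by", "e-text prepared by"].any
    (fun p => PySem.Str.startswith (PySem.Str.lower line) p)

-- line.strip() is truthy (non-empty) — Python's falsy-string test
def pvBlank (line : String) : Bool := PySem.Str.strip line == ""

-- while end < len(lines) and lines[end].strip(): end += 1
def pvWhileEnd (lines : List String) (e : Nat) : Nat :=
  if _h : e < lines.length then
    if !pvBlank (lines.getD e "") then pvWhileEnd lines (e + 1) else e
  else e
termination_by lines.length - e

-- for i in range(limit): …  (lines[:i] = take i and lines[end:] = drop end are exact
-- for these nonnegative in-range Python slice bounds)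
def pvLoopA (lines : List String) (limit i : Nat) : List String :=
  if i < limit then
    if pvHit (lines.getD i "") then
      lines.take i ++ lines.drop (pvWhileEnd lines (i + 1))
    else pvLoopA lines limit (i + 1)
  else lines
termination_by limit - i

def strip_produced_by_py (lines : List String) : List String :=
  pvLoopA lines (min 100 lines.length) 0

-- ===== PORT B =====
-- single pass over enumerate(lines); st = 0 searching, 1 skipping, 2 done
def pvGoB : List String → Nat → Nat → List String
  | [], _, _ => []
  | l :: ls, i, st =>
    if st = 0 ∧ i < 100 ∧ pvHit l then pvGoB ls (i + 1) 1
    else if st = 1 then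
      if pvBlank l then l :: pvGoB ls (i + 1) 2 else pvGoB ls (i + 1) 1
    else l :: pvGoB ls (i + 1) st

def strip_produced_by_py_alt (lines : List String) : List String :=
  pvGoB lines 0 0

-- ===== PRECONDITION & SPEC =====
def Spec_strip_produced_by_py (lines : List String) (out : List String) : Prop := out = strip_produced_by_py_alt lines
instance (lines : List String) (out : List String) : Decidable (Spec_strip_produced_by_py lines out) := by unfold Spec_strip_produced_by_py; infer_instance

-- ===== CLAIM (what is proved, stated in full; the proofs are below) =====
def Claim_equal_strip_produced_by_py : Prop := ∀ (lines : List String), Dom_strip_produced_by_py lines → Spec_strip_produced_by_py lines (strip_produced_by_py lines)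

-- ===== LEMMAS AND PROOFS =====

-- structural form of A's inner while loop, used as a bridge between the two ports
def pvSkip : List String → List String
  | [] => []
  | l :: ls => if pvBlank l then l :: ls else pvSkip ls

theorem pvGoB_done (ls : List String) (i : Nat) : pvGoB ls i 2 = ls := by
  induction ls generalizing i with
  | nil => rfl
  | cons l ls ih => simp [pvGoB, ih]

theorem pvGoB_skip (ls : List String) (i : Nat) : pvGoB ls i 1 = pvSkip ls := by
  induction ls generalizing i with
  | nil => rfl
  | cons l ls ih =>
    rw [pvGoB, if_neg (by simp), if_pos rfl, pvSkip]
    by_cases hb : pvBlank l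
    · rw [if_pos hb, if_pos hb, pvGoB_done]
    · rw [if_neg hb, if_neg hb, ih]

theorem pvGoB_big (ls : List String) (i : Nat) (hi : 100 ≤ i) : pvGoB ls i 0 = ls := by
  induction ls generalizing i with
  | nil => rfl
  | cons l ls ih =>
    rw [pvGoB, if_neg (by omega), if_neg (by omega), ih _ (by omega)]

theorem pv_drop_cons (lines : List String) (e : Nat) (h : e < lines.length) :
    lines.drop e = lines.getD e "" :: lines.drop (e + 1) := by
  rw [List.getD_eq_getElem?_getD, List.getElem?_eq_getElem h, Option.getD_some]
  exact List.drop_eq_getElem_cons h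

theorem pvWhileEnd_drop (lines : List String) (e : Nat) :
    lines.drop (pvWhileEnd lines e) = pvSkip (lines.drop e) := by
  by_cases h : e < lines.length
  · rw [pvWhileEnd, dif_pos h]
    by_cases hb : pvBlank (lines.getD e "")
    · rw [if_neg (by rw [hb]; simp)]
      conv_rhs => rw [pv_drop_cons lines e h, pvSkip]
      rw [if_pos hb, ← pv_drop_cons lines e h]
    · rw [if_pos (by rw [Bool.not_eq_true']; exact Bool.eq_false_iff.mpr hb),
        pvWhileEnd_drop lines (e + 1), pv_drop_cons lines e h, pvSkip, if_neg hb]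
  · rw [pvWhileEnd, dif_neg h, List.drop_eq_nil_of_le (by omega)]
    rfl
termination_by lines.length - e

theorem pvLoopA_goB (lines : List String) (i : Nat) :
    pvLoopA lines (min 100 lines.length) i = lines.take i ++ pvGoB (lines.drop i) i 0 := by
  by_cases h : i < min 100 lines.length
  · have hlen : i < lines.length := by omega
    rw [pvLoopA, if_pos h]
    by_cases hh : pvHit (lines.getD i "")
    · rw [if_pos hh]
      conv_rhs => rw [pv_drop_cons lines i hlen]
      rw [pvGoB, if_pos ⟨rfl, by omega, hh⟩, pvGoB_skip, pvWhileEnd_drop]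
    · rw [if_neg hh, pvLoopA_goB lines (i + 1)]
      conv_rhs => rw [pv_drop_cons lines i hlen]
      rw [pvGoB, if_neg (fun hc => hh hc.2.2), if_neg (by omega)]
      have ht : lines.take (i + 1) = lines.take i ++ [lines[i]] := by
        rw [List.take_add_one, List.getElem?_eq_getElem hlen]
        rfl
      rw [ht, List.getD_eq_getElem?_getD, List.getElem?_eq_getElem hlen, Option.getD_some,
        List.append_assoc, List.singleton_append]
  · rw [pvLoopA, if_neg h]
    rcases Nat.lt_or_ge i 100 with hi | hi
    · have hle : lines.length ≤ i := by omega
      rw [List.drop_eq_nil_of_le hle]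
      simp [pvGoB, List.take_of_length_le hle]
    · rw [pvGoB_big _ _ hi, List.take_append_drop]
termination_by min 100 lines.length - i

-- ===== VERDICT (by name: the statement is the Claim_ definition above) =====
theorem strip_produced_by_py_spec : Claim_equal_strip_produced_by_py := by
  intro lines _
  unfold Spec_strip_produced_by_py strip_produced_by_py strip_produced_by_py_alt
  simpa using pvLoopA_goB lines 0
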